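-- pv_equiv track=rewrite | github.com/Project-08/Project-8 | project8/neural_network/checkpoints.py | str_remove_line_before_dots_if_dots_in_line
-- ===== SOURCE A (Python) =====
-- def str_remove_line_before_dots_if_dots_in_line(s: str) -> str:
--     if s[-1] != '\n':  # make sure last line ends with a newline
--         s += '\n'
--     out = ''
--     line = ''
--     before_dots = True
--     for char in s:
--         line += char
--         if char == '\n':
--             if ':' not in line:
--                 out += line
--             else:
--                 out += char
--             line = ''
--             before_dots = True
--         if not before_dots:
--             out += char
--         if char == ':':
--             before_dots = False
--     return out
-- ===== SOURCE B (Python) =====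
-- def str_remove_line_before_dots_if_dots_in_line(s: str) -> str:
--     if s[-1] != '\n':  # make sure last line ends with a newline
--         s += '\n'
--     lines = s.split('\n')[:-1]
--     return ''.join(
--         (line.partition(':')[2] if ':' in line else line) + '\n'
--         for line in lines
--     )
-- ===== Notes on version B (the rewrite author's own statement) =====
-- stated objective: simpler
-- what changed: Replaced A's char-by-char state machine (line buffer + before_dots flag, three interleaved ifs per character) by split-on-newline, per-line partition(':')[2], and a single join.
import Mathlib
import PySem

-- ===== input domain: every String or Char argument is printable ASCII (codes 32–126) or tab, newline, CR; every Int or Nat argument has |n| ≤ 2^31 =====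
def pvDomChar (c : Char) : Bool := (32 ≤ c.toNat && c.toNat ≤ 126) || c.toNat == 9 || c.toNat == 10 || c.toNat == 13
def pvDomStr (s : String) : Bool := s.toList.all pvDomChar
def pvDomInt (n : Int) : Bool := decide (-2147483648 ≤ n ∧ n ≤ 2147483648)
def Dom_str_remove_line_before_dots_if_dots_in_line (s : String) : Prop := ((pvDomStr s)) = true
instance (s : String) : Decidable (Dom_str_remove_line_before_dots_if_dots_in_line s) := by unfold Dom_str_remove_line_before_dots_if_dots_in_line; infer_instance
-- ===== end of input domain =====

-- B replaces A's char-by-char state machine (line buffer + before_dots flag) by a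
-- split-on-newline / per-line decomposition; objective: simpler, same O(n) cost.

-- ===== PORT A =====
-- one iteration of A's `for char in s` loop over state (out, line, before_dots);
-- the Python `if char == '\n': … line = ''; before_dots = True` block is rendered as
-- three ifs on the same condition, in the loop body's order
def pvStepA (st : List Char × List Char × Bool) (c : Char) : List Char × List Char × Bool :=
  let out := st.1
  let line := st.2.1 ++ [c]                                                -- line += char
  let out := if c = '\n' then (if ':' ∉ line then out ++ line else out ++ [c]) else out
  let line := if c = '\n' then [] else line                                -- line = ''
  let bd := if c = '\n' then true else st.2.2                              -- before_dots = True
  let out := if bd = false then out ++ [c] else out                        -- if not before_dots: out += char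
  let bd := if c = ':' then false else bd                                  -- if char == ':': before_dots = False
  (out, line, bd)

def str_remove_line_before_dots_if_dots_in_line (s : String) : String :=
  let l := s.toList
  -- s[-1]: IndexError on "" (excluded by Pre_)
  let l := if PySem.List.pyGet? l (-1) ≠ some '\n' then l ++ ['\n'] else l
  String.mk ((l.foldl pvStepA ([], [], true)).1)

-- ===== PORT B =====
-- one element of B's generator: (line.partition(':')[2] if ':' in line else line) + '\n';
-- partition(':')[2] (everything after the FIRST ':') is ported by hand as
-- tail-of-dropWhile — exact here because it is guarded by ':' ∈ p
def pvProcLine (p : List Char) : List Char :=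
  (if ':' ∈ p then (p.dropWhile (· != ':')).tail else p) ++ ['\n']

def str_remove_line_before_dots_if_dots_in_line_alt (s : String) : String :=
  let l := s.toList
  -- s[-1]: IndexError on "" (excluded by Pre_)
  let l := if PySem.List.pyGet? l (-1) ≠ some '\n' then l ++ ['\n'] else l
  let parts := (PySem.Chars.splitOn l ['\n']).dropLast                     -- s.split('\n')[:-1]
  String.mk ((parts.map pvProcLine).flatten)                               -- ''.join(...)

-- ===== PRECONDITION & SPEC =====
-- Pre_ excludes only s = "", on which A's `s[-1]` raises IndexError
def Pre_str_remove_line_before_dots_if_dots_in_line (s : String) : Prop := s ≠ ""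
instance (s : String) : Decidable (Pre_str_remove_line_before_dots_if_dots_in_line s) := by unfold Pre_str_remove_line_before_dots_if_dots_in_line; infer_instance
def pvWitness_str_remove_line_before_dots_if_dots_in_line : String := "a:b\nplain\n"

def Spec_str_remove_line_before_dots_if_dots_in_line (s : String) (out : String) : Prop := out = str_remove_line_before_dots_if_dots_in_line_alt s
instance (s : String) (out : String) : Decidable (Spec_str_remove_line_before_dots_if_dots_in_line s out) := by unfold Spec_str_remove_line_before_dots_if_dots_in_line; infer_instance

-- ===== CLAIM (what is proved, stated in full; the proofs are below) =====
def Claim_equal_str_remove_line_before_dots_if_dots_in_line : Prop := ∀ (s : String), Dom_str_remove_line_before_dots_if_dots_in_line s → Pre_str_remove_line_before_dots_if_dots_in_line s → Spec_str_remove_line_before_dots_if_dots_in_line s (str_remove_line_before_dots_if_dots_in_line s)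

-- ===== LEMMAS AND PROOFS =====

-- splitOn.go threads its accumulator: it can be pulled out front
theorem pv_go_acc (sep : List Char) (fuel : ℕ) : ∀ (l cur : List Char) (acc : List (List Char)),
    PySem.Chars.splitOn.go sep fuel l cur acc = acc.reverse ++ PySem.Chars.splitOn.go sep fuel l cur [] := by
  induction fuel with
  | zero => intro l cur acc; simp [PySem.Chars.splitOn.go]
  | succ f ih =>
    intro l cur acc
    cases l with
    | nil => simp [PySem.Chars.splitOn.go]
    | cons c rest =>
      simp only [PySem.Chars.splitOn.go]
      by_cases h : sep.isPrefixOf (c :: rest) = true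
      · simp only [h, if_true]
        rw [ih _ _ (cur.reverse :: acc), ih _ _ [cur.reverse]]
        simp
      · simp only [h]
        exact ih _ _ _

theorem pv_go_ne_nil (sep : List Char) (fuel : ℕ) : ∀ (l cur : List Char),
    PySem.Chars.splitOn.go sep fuel l cur [] ≠ [] := by
  induction fuel with
  | zero => intro l cur; simp [PySem.Chars.splitOn.go]
  | succ f ih =>
    intro l cur
    cases l with
    | nil => simp [PySem.Chars.splitOn.go]
    | cons c rest =>
      simp only [PySem.Chars.splitOn.go]
      by_cases h : sep.isPrefixOf (c :: rest) = true
      · simp only [h, if_true]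
        rw [pv_go_acc]
        simp
      · simp only [h]
        exact ih _ _

-- scanning a newline-free prefix just moves it (reversed) into cur
theorem pv_go_scan : ∀ (a : List Char), '\n' ∉ a → ∀ (f : ℕ) (l2 cur : List Char) (acc : List (List Char)),
    PySem.Chars.splitOn.go ['\n'] (a.length + f) (a ++ l2) cur acc =
      PySem.Chars.splitOn.go ['\n'] f l2 (a.reverse ++ cur) acc := by
  intro a
  induction a with
  | nil => intro _ f l2 cur acc; simp
  | cons c t ih =>
    intro h f l2 cur acc
    have hc : ('\n' == c) = false := by
      simp only [beq_eq_false_iff_ne, ne_eq]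
      intro e; exact h (by simp [← e])
    have ht : '\n' ∉ t := fun hm => h (List.mem_cons_of_mem _ hm)
    have hfuel : (c :: t).length + f = (t.length + f) + 1 := by simp [List.length_cons]; omega
    rw [hfuel]
    show PySem.Chars.splitOn.go ['\n'] ((t.length + f) + 1) (c :: (t ++ l2)) cur acc = _
    simp only [PySem.Chars.splitOn.go, List.isPrefixOf, hc, Bool.false_and]
    rw [ih ht f l2 (c :: cur) acc]
    simp

theorem pv_splitOn_cons (a rest : List Char) (ha : '\n' ∉ a) :
    PySem.Chars.splitOn (a ++ '\n' :: rest) ['\n'] = a :: PySem.Chars.splitOn rest ['\n'] := by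
  simp only [PySem.Chars.splitOn]
  have hlen : (a ++ '\n' :: rest).length + 1 = a.length + (rest.length + 2) := by
    simp [List.length_append]; omega
  rw [hlen, pv_go_scan a ha (rest.length + 2) ('\n' :: rest) [] []]
  show PySem.Chars.splitOn.go ['\n'] ((rest.length + 1) + 1) ('\n' :: rest) (a.reverse ++ []) [] = _
  have hpre : (['\n'] : List Char).isPrefixOf ('\n' :: rest) = true := by simp [List.isPrefixOf]
  simp only [PySem.Chars.splitOn.go, hpre, if_true]
  rw [pv_go_acc]
  simp

theorem pv_splitOn_ne_nil (l : List Char) : PySem.Chars.splitOn l ['\n'] ≠ [] := by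
  simp only [PySem.Chars.splitOn]
  exact pv_go_ne_nil _ _ _ _

-- pvStepA only appends to out
theorem pv_stepA_fst (st : List Char × List Char × Bool) (c : Char) :
    pvStepA st c = (st.1 ++ (pvStepA ([], st.2.1, st.2.2) c).1, (pvStepA ([], st.2.1, st.2.2) c).2) := by
  rcases st with ⟨out, line, bd⟩
  simp only [pvStepA]
  split_ifs <;> simp

theorem pv_foldl_out : ∀ (l : List Char) (out line : List Char) (bd : Bool),
    List.foldl pvStepA (out, line, bd) l =
      (out ++ (List.foldl pvStepA ([], line, bd) l).1, (List.foldl pvStepA ([], line, bd) l).2) := by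
  intro l
  induction l with
  | nil => intro out line bd; simp
  | cons c t ih =>
    intro out line bd
    rw [List.foldl_cons, List.foldl_cons, pv_stepA_fst (out, line, bd) c]
    rcases hp : pvStepA ([], line, bd) c with ⟨d, l1, b1⟩
    rw [ih (out ++ d) l1 b1, ih d l1 b1]
    simp

-- scanning a newline-free chunk: emitted = everything after the first ':' (or all of it if bd is already off)
theorem pv_scan_line : ∀ (a : List Char), '\n' ∉ a → ∀ (line : List Char) (bd : Bool),
    List.foldl pvStepA ([], line, bd) a =
      ((if bd then (a.dropWhile (· != ':')).tail else a), line ++ a, bd && !(decide (':' ∈ a))) := by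
  intro a
  induction a with
  | nil => intro _ line bd; cases bd <;> simp
  | cons c t ih =>
    intro h line bd
    have hc : c ≠ '\n' := fun e => h (by simp [e])
    have ht : '\n' ∉ t := fun hm => h (List.mem_cons_of_mem _ hm)
    rw [List.foldl_cons]
    have hstep : pvStepA ([], line, bd) c =
        ((if bd = false then [c] else []), line ++ [c], if c = ':' then false else bd) := by
      simp [pvStepA, hc]
    rw [hstep, pv_foldl_out, ih ht (line ++ [c])]
    by_cases hcc : c = ':' <;> cases bd <;> simp [hcc]
    intro _ e
    exact hcc e.symm

-- one full line of A's loop produces exactly pvProcLine of that line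
theorem pv_line_step (a rest : List Char) (h : '\n' ∉ a) :
    List.foldl pvStepA ([], [], true) (a ++ '\n' :: rest) =
      (pvProcLine a ++ (List.foldl pvStepA ([], [], true) rest).1,
       (List.foldl pvStepA ([], [], true) rest).2) := by
  rw [List.foldl_append, pv_scan_line a h [] true, List.foldl_cons]
  have hstep : pvStepA ((if true then (a.dropWhile (· != ':')).tail else a), [] ++ a,
      true && !(decide (':' ∈ a))) '\n' = (pvProcLine a, [], true) := by
    by_cases hm : ':' ∈ a
    · have : ':' ∈ a ++ ['\n'] := by simp [hm]
      simp [pvStepA, pvProcLine, hm, this]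
    · have hd : a.dropWhile (· != ':') = [] := by
        rw [List.dropWhile_eq_nil_iff]
        intro x hx
        simp only [bne_iff_ne, ne_eq]
        intro e; exact hm (e ▸ hx)
      have : ':' ∉ a ++ ['\n'] := by simp [hm]
      simp [pvStepA, pvProcLine, hm, hd, this]
  rw [hstep, pv_foldl_out]

theorem pv_mem_split_first {c : Char} : ∀ {l : List Char}, c ∈ l →
    ∃ a rest, l = a ++ c :: rest ∧ c ∉ a := by
  intro l hm
  induction l with
  | nil => cases hm
  | cons x t ih =>
    by_cases hx : x = c
    · exact ⟨[], t, by simp [hx], by simp⟩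
    · have hmt : c ∈ t := by
        rcases List.mem_cons.mp hm with h1 | h1
        · exact absurd h1.symm hx
        · exact h1
      obtain ⟨a, rest, hEq, ha⟩ := ih hmt
      refine ⟨x :: a, rest, by simp [hEq], ?_⟩
      intro hmem
      rcases List.mem_cons.mp hmem with h1 | h1
      · exact hx h1.symm
      · exact ha h1

theorem pv_main : ∀ (n : ℕ) (l : List Char), l.length ≤ n → (l = [] ∨ l.getLast? = some '\n') →
    (List.foldl pvStepA ([], [], true) l).1 =
      (((PySem.Chars.splitOn l ['\n']).dropLast).map pvProcLine).flatten := by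
  intro n
  induction n with
  | zero =>
    intro l hl _
    have : l = [] := List.eq_nil_of_length_eq_zero (Nat.le_zero.mp hl)
    subst this; rfl
  | succ n ih =>
    intro l hl hend
    rcases hend with rfl | hlast
    · rfl
    · have hmem : '\n' ∈ l := by
        obtain ⟨l', rfl⟩ := List.getLast?_eq_some_iff.mp hlast
        simp
      obtain ⟨a, rest, rfl, ha⟩ := pv_mem_split_first hmem
      rw [pv_line_step a rest ha, pv_splitOn_cons a rest ha,
        List.dropLast_cons_of_ne_nil (pv_splitOn_ne_nil rest)]
      simp only [List.map_cons, List.flatten_cons]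
      congr 1
      refine ih rest ?_ ?_
      · have : (a ++ '\n' :: rest).length = a.length + 1 + rest.length := by simp; omega
        omega
      · cases rest with
        | nil => exact Or.inl rfl
        | cons c rs =>
          right
          have h2 : ('\n' :: c :: rs).getLast? = some '\n' := by
            rw [← List.getLast?_append_of_ne_nil (l₁ := a) (by simp)]
            exact hlast
          simpa using h2

-- ===== VERDICT (by name: the statement is the Claim_ definition above) =====
theorem str_remove_line_before_dots_if_dots_in_line_spec : Claim_equal_str_remove_line_before_dots_if_dots_in_line := by
  intro s _ _
  unfold Spec_str_remove_line_before_dots_if_dots_in_line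
  unfold str_remove_line_before_dots_if_dots_in_line str_remove_line_before_dots_if_dots_in_line_alt
  dsimp only
  set l := s.toList with hl
  split_ifs with hif
  · exact congrArg String.mk (pv_main (l ++ ['\n']).length _ le_rfl (Or.inr (by simp)))
  · have hif' : PySem.List.pyGet? l (-1) = some '\n' := not_not.mp hif
    have hlast : l.getLast? = some '\n' := by rw [← PySem.List.pyGet?_neg_one]; exact hif'
    exact congrArg String.mk (pv_main l.length l le_rfl (Or.inr hlast))
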